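-- pv_equiv track=rewrite | github.com/danielhuf/INF1026 | Aula_9/Aula_9.py | criaDicInverso
-- ===== SOURCE A (Python) =====
-- def criaDicInverso(dHistorico):
--     dDisc={}
--     for al in dHistorico:   #essa estrutura dá no mesmo que usar o items
--         for disc in dHistorico[al]:
--             if disc not in dDisc:
--                 dDisc[disc]={al:dHistorico[al][disc]}
--             else:
--                 dDisc[disc].update({al:dHistorico[al][disc]})
--     return dDisc
-- ===== SOURCE B (Python) =====
-- def criaDicInverso(dHistorico):
--     # Pass 1: disciplines in first-encounter order.
--     discs = []
--     for al in dHistorico: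
--         for disc in dHistorico[al]:
--             if disc not in discs:
--                 discs.append(disc)
--     # Pass 2: group by output key; inner dicts follow dHistorico's order.
--     return {disc: {al: dHistorico[al][disc]
--                    for al in dHistorico if disc in dHistorico[al]}
--             for disc in discs}
-- ===== Notes on version B (the rewrite author's own statement) =====
-- stated objective: alternative
-- what changed: B inverts the traversal: a first pass collects the disciplines in first-encounter order, then the result is built discipline-by-discipline, each inner dict by one comprehension over the students, instead of A's single streaming pass that inserts/updates per (student, discipline) entry.
import Mathlib
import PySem

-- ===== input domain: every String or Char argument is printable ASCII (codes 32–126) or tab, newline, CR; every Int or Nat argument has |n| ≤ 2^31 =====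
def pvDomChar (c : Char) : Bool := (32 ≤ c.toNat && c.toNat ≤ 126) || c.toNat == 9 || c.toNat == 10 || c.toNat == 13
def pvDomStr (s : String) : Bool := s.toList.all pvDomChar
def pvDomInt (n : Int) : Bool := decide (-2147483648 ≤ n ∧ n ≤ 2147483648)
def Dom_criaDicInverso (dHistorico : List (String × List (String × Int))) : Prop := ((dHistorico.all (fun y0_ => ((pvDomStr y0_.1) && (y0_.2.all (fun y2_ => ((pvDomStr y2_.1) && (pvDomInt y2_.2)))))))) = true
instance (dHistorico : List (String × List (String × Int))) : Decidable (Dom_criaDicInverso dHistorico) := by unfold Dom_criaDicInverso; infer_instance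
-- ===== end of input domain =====

-- B inverts the traversal: one pass collects the disciplines in first-encounter order, then one
-- rescan per discipline builds its inner dict; same result and cost class (objective: alternative).
-- Dicts are assoc lists (unique keys, insertion order); pvSetItem/pvModify are the exact
-- assoc-list meanings of Python's d[k] = v (overwrite in place, new keys append) and of
-- mutating d[k] in place.

-- d[k] = v : overwrite keeps position, a new key appends at the end
def pvSetItem {α : Type} (d : List (String × α)) (k : String) (v : α) : List (String × α) :=
  match d with
  | [] => [(k, v)]
  | (k', v') :: t => if k' = k then (k, v) :: t else (k', v') :: pvSetItem t k v

-- apply f to the value stored at k (k present), keeping its position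
def pvModify {α : Type} (d : List (String × α)) (k : String) (f : α → α) : List (String × α) :=
  match d with
  | [] => []
  | (k', v') :: t => if k' = k then (k', f v') :: t else (k', v') :: pvModify t k f

-- ===== PORT A =====
-- body of A's inner loop: one (disc, v) entry of student al
def aInner (al : String) (dDisc : List (String × List (String × Int))) (q : String × Int) :
    List (String × List (String × Int)) :=
  if dDisc.lookup q.1 = none then
    pvSetItem dDisc q.1 [(al, q.2)]                    -- dDisc[disc] = {al: v}
  else
    pvModify dDisc q.1 (fun m => pvSetItem m al q.2)   -- dDisc[disc].update({al: v})

def criaDicInverso (dHistorico : List (String × List (String × Int))) :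
    List (String × List (String × Int)) :=
  dHistorico.foldl (fun dDisc p => p.2.foldl (aInner p.1) dDisc) []

-- ===== PORT B =====
-- first pass of B: extend the first-encounter discipline list with one student's inner keys
def discStep (acc : List String) (inner : List (String × Int)) : List String :=
  inner.foldl (fun acc q => if q.1 ∈ acc then acc else acc ++ [q.1]) acc

def altDiscs (dHistorico : List (String × List (String × Int))) : List String :=
  dHistorico.foldl (fun acc p => discStep acc p.2) []

-- inner comprehension of B: {al: dHistorico[al][disc] for al in dHistorico if disc in dHistorico[al]}
def altCol (dHistorico : List (String × List (String × Int))) (disc : String) :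
    List (String × Int) :=
  dHistorico.filterMap (fun p => (p.2.lookup disc).map (fun v => (p.1, v)))

def criaDicInverso_alt (dHistorico : List (String × List (String × Int))) :
    List (String × List (String × Int)) :=
  (altDiscs dHistorico).map (fun disc => (disc, altCol dHistorico disc))

-- ===== PRECONDITION & SPEC =====
-- Pre_ only says the assoc list encodes a Python dict of dicts (outer and inner keys unique);
-- Python dicts cannot carry duplicate keys, so no input A accepts is excluded.
def Pre_criaDicInverso (dHistorico : List (String × List (String × Int))) : Prop :=
  (dHistorico.map Prod.fst).Nodup ∧ ∀ p ∈ dHistorico, (p.2.map Prod.fst).Nodup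
instance (dHistorico : List (String × List (String × Int))) : Decidable (Pre_criaDicInverso dHistorico) := by
  unfold Pre_criaDicInverso; infer_instance

def pvWitness_criaDicInverso : (List (String × List (String × Int))) :=
  [("ana", [("mat", 5), ("fis", 7)]), ("bob", [("mat", 3)])]

def Spec_criaDicInverso (dHistorico : List (String × List (String × Int))) (out : List (String × List (String × Int))) : Prop := out = criaDicInverso_alt dHistorico
instance (dHistorico : List (String × List (String × Int))) (out : List (String × List (String × Int))) : Decidable (Spec_criaDicInverso dHistorico out) := by unfold Spec_criaDicInverso; infer_instance

-- ===== CLAIM (what is proved, stated in full; the proofs are below) =====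
def Claim_equal_criaDicInverso : Prop := ∀ (dHistorico : List (String × List (String × Int))), Dom_criaDicInverso dHistorico → Pre_criaDicInverso dHistorico → Spec_criaDicInverso dHistorico (criaDicInverso dHistorico)

-- ===== LEMMAS AND PROOFS =====

theorem mem_discStep {acc : List String} {inner : List (String × Int)} {x : String} :
    x ∈ discStep acc inner ↔ x ∈ acc ∨ x ∈ inner.map Prod.fst := by
  induction inner generalizing acc with
  | nil => simp [discStep]
  | cons q t ih =>
    simp only [discStep, List.foldl_cons] at *
    by_cases h : q.1 ∈ acc
    · rw [if_pos h, ih]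
      simp only [List.map_cons, List.mem_cons]
      constructor
      · tauto
      · rintro (hx | rfl | hx) <;> [exact Or.inl hx; exact Or.inl h; exact Or.inr hx]
    · rw [if_neg h, ih]
      simp only [List.mem_append, List.map_cons, List.mem_cons]
      tauto

theorem nodup_discStep {acc : List String} {inner : List (String × Int)} (h : acc.Nodup) :
    (discStep acc inner).Nodup := by
  induction inner generalizing acc with
  | nil => simpa [discStep]
  | cons q t ih =>
    simp only [discStep, List.foldl_cons]
    by_cases hq : q.1 ∈ acc
    · simpa [hq] using ih h
    · simp only [hq, if_false]
      refine ih ?_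
      simp only [List.nodup_append, List.nodup_singleton, true_and]
      constructor
      · exact h
      · intro a ha b hb
        simp only [List.mem_singleton] at hb
        subst hb
        exact fun he => hq (he ▸ ha)

theorem subset_discStep {acc : List String} {inner : List (String × Int)} :
    acc ⊆ discStep acc inner := fun _ hx => mem_discStep.mpr (Or.inl hx)

theorem nodup_altDiscs_aux {d : List (String × List (String × Int))} {acc : List String}
    (h : acc.Nodup) : (d.foldl (fun acc p => discStep acc p.2) acc).Nodup := by
  induction d generalizing acc with
  | nil => simpa
  | cons p t ih => exact ih (nodup_discStep h)

theorem nodup_altDiscs (d : List (String × List (String × Int))) : (altDiscs d).Nodup :=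
  nodup_altDiscs_aux List.nodup_nil

theorem mem_altDiscs_aux {d : List (String × List (String × Int))} {acc : List String} {x : String} :
    x ∈ d.foldl (fun acc p => discStep acc p.2) acc ↔
      x ∈ acc ∨ ∃ p ∈ d, x ∈ p.2.map Prod.fst := by
  induction d generalizing acc with
  | nil => simp
  | cons p t ih => simp [ih, mem_discStep]; tauto

theorem mem_altDiscs {d : List (String × List (String × Int))} {x : String} :
    x ∈ altDiscs d ↔ ∃ p ∈ d, x ∈ p.2.map Prod.fst := by
  simp [altDiscs, mem_altDiscs_aux]

theorem mem_keys_of_lookup {α : Type} {l : List (String × α)} {k : String} {v : α}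
    (h : l.lookup k = some v) : k ∈ l.map Prod.fst := by
  induction l with
  | nil => simp at h
  | cons q t ih =>
    rw [List.lookup] at h
    by_cases hk : k = q.1
    · simp only [List.map_cons, List.mem_cons]
      exact Or.inl hk
    · rw [beq_eq_false_iff_ne.mpr hk] at h
      simp only [List.map_cons, List.mem_cons]
      exact Or.inr (ih h)

theorem altCol_eq_nil {d : List (String × List (String × Int))} {disc : String}
    (h : disc ∉ altDiscs d) : altCol d disc = [] := by
  rw [altCol, List.filterMap_eq_nil_iff]
  intro p hp
  cases hlk : p.2.lookup disc with
  | none => simp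
  | some v =>
    exact absurd (mem_altDiscs.mpr ⟨p, hp, mem_keys_of_lookup hlk⟩) h

theorem keys_altCol_subset {d : List (String × List (String × Int))} {disc al : String}
    (h : ∃ w : Int, (al, w) ∈ altCol d disc) : al ∈ d.map Prod.fst := by
  obtain ⟨w, hw⟩ := h
  simp only [altCol, List.mem_filterMap] at hw
  obtain ⟨p, hp, hv⟩ := hw
  cases hlk : p.2.lookup disc <;> simp [hlk] at hv
  exact List.mem_map.mpr ⟨p, hp, hv.1⟩

theorem altCol_append {d : List (String × List (String × Int))} {al disc : String}
    {inner : List (String × Int)} :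
    altCol (d ++ [(al, inner)]) disc =
      altCol d disc ++ ((inner.lookup disc).map (fun v => (al, v))).toList := by
  simp only [altCol, List.filterMap_append]
  cases h : inner.lookup disc <;> simp [h]

theorem altDiscs_append {d : List (String × List (String × Int))} {al : String}
    {inner : List (String × Int)} :
    altDiscs (d ++ [(al, inner)]) = discStep (altDiscs d) inner := by
  simp [altDiscs, List.foldl_append]

theorem pvSetItem_append {α : Type} {m : List (String × α)} {k : String} {v : α}
    (h : k ∉ m.map Prod.fst) : pvSetItem m k v = m ++ [(k, v)] := by
  induction m with
  | nil => rfl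
  | cons q t ih =>
    simp only [List.map_cons, List.mem_cons, not_or] at h
    simp [pvSetItem, Ne.symm h.1, ih h.2]

theorem lookup_map_self {D : List String} {g : String → List (String × Int)} {k : String} :
    (D.map (fun q => (q, g q))).lookup k = if k ∈ D then some (g k) else none := by
  induction D with
  | nil => simp
  | cons q t ih =>
    by_cases h : q = k
    · subst h; simp
    · have hb : (k == q) = false := beq_eq_false_iff_ne.mpr (Ne.symm h)
      simp [List.lookup, hb, ih]
      simp [Ne.symm h]

theorem pvModify_map_self {D : List String} {g : String → List (String × Int)} {k : String}
    {f : List (String × Int) → List (String × Int)} (hnd : D.Nodup) (hk : k ∈ D) :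
    pvModify (D.map (fun q => (q, g q))) k f =
      D.map (fun q => (q, if q = k then f (g q) else g q)) := by
  induction D with
  | nil => simp at hk
  | cons q t ih =>
    simp only [List.nodup_cons] at hnd
    by_cases h : q = k
    · subst h
      simp only [List.map_cons, pvModify, if_true]
      congr 1
      apply List.map_congr_left
      intro x hx
      have : x ≠ q := fun he => hnd.1 (he ▸ hx)
      simp [this]
    · have hk' : k ∈ t := by
        rcases List.mem_cons.mp hk with h' | h'
        · exact absurd h'.symm h
        · exact h'
      simp [pvModify, h, ih hnd.2 hk']

theorem lookup_append_right {l l' : List (String × Int)} {k : String}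
    (h : l.lookup k = none) : (l ++ l').lookup k = l'.lookup k := by
  induction l with
  | nil => simp
  | cons q t ih =>
    by_cases hq : k = q.1
    · simp [List.lookup, beq_iff_eq.mpr hq] at h
    · have hb : (k == q.1) = false := beq_eq_false_iff_ne.mpr hq
      rw [List.lookup, hb] at h
      rw [List.cons_append, List.lookup, hb]
      exact ih h

theorem lookup_append_left {α : Type} {l l' : List (String × α)} {k : String} {w : α}
    (h : l.lookup k = some w) : (l ++ l').lookup k = some w := by
  induction l with
  | nil => simp at h
  | cons q t ih =>
    rw [List.cons_append, List.lookup]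
    rw [List.lookup] at h
    by_cases hq : k = q.1
    · rw [beq_iff_eq.mpr hq] at h ⊢
      exact h
    · rw [beq_eq_false_iff_ne.mpr hq] at h ⊢
      exact ih h

theorem lookup_eq_none_of_not_mem {l : List (String × Int)} {k : String}
    (h : k ∉ l.map Prod.fst) : l.lookup k = none := by
  cases hlk : l.lookup k with
  | none => rfl
  | some v => exact absurd (mem_keys_of_lookup hlk) h

-- one entry (disc, v) of student al's inner dict, pushed through B's view of the state
theorem step_eq {d : List (String × List (String × Int))} {al : String}
    {p : List (String × Int)} {disc : String} {v : Int}
    (hal : al ∉ d.map Prod.fst) (hdisc : disc ∉ p.map Prod.fst) :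
    aInner al (criaDicInverso_alt (d ++ [(al, p)])) (disc, v) =
      criaDicInverso_alt (d ++ [(al, p ++ [(disc, v)])]) := by
  have hplk : p.lookup disc = none := lookup_eq_none_of_not_mem hdisc
  have hD : altDiscs (d ++ [(al, p ++ [(disc, v)])]) =
      (if disc ∈ altDiscs (d ++ [(al, p)]) then altDiscs (d ++ [(al, p)])
       else altDiscs (d ++ [(al, p)]) ++ [disc]) := by
    rw [altDiscs_append, altDiscs_append]
    show discStep (altDiscs d) (p ++ [(disc, v)]) = _
    simp [discStep, List.foldl_append]
  have hcol : ∀ q, altCol (d ++ [(al, p ++ [(disc, v)])]) q =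
      if q = disc then altCol (d ++ [(al, p)]) q ++ [(al, v)]
      else altCol (d ++ [(al, p)]) q := by
    intro q
    rw [altCol_append, altCol_append]
    by_cases hq : q = disc
    · subst hq
      rw [lookup_append_right hplk]
      simp [List.lookup, hplk]
    · have hthis : (p ++ [(disc, v)]).lookup q = p.lookup q := by
        cases hpq : p.lookup q with
        | some w => rw [lookup_append_left hpq]
        | none =>
          rw [lookup_append_right hpq]
          rw [List.lookup, beq_eq_false_iff_ne.mpr hq]
          rfl
      simp [hthis, hq]
  by_cases hmem : disc ∈ altDiscs (d ++ [(al, p)])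
  · -- disc already a key of the state: the update branch
    have hlk : (criaDicInverso_alt (d ++ [(al, p)])).lookup disc =
        some (altCol (d ++ [(al, p)]) disc) := by
      rw [criaDicInverso_alt, lookup_map_self]; simp [hmem]
    rw [aInner, hlk, if_neg (by simp)]
    rw [criaDicInverso_alt, pvModify_map_self (nodup_altDiscs _) hmem]
    rw [criaDicInverso_alt, hD, if_pos hmem]
    apply List.map_congr_left
    intro q hq
    rw [hcol]
    by_cases hqd : q = disc
    · subst hqd
      have halc : al ∉ (altCol (d ++ [(al, p)]) q).map Prod.fst := by
        intro hmem'
        rw [altCol_append, hplk] at hmem'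
        simp at hmem'
        exact hal (keys_altCol_subset hmem')
      simp [pvSetItem_append halc]
    · simp [hqd]
  · -- new key: appended at the end
    have hlk : (criaDicInverso_alt (d ++ [(al, p)])).lookup disc = none := by
      rw [criaDicInverso_alt, lookup_map_self]; simp [hmem]
    rw [aInner, hlk, if_pos rfl]
    have hkeys : disc ∉ (criaDicInverso_alt (d ++ [(al, p)])).map Prod.fst := by
      rw [criaDicInverso_alt]; simpa using hmem
    rw [pvSetItem_append hkeys]
    rw [criaDicInverso_alt, criaDicInverso_alt, hD, if_neg hmem]
    rw [List.map_append]
    congr 1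
    · apply List.map_congr_left
      intro q hq
      rw [hcol, if_neg (by intro he; exact hmem (he ▸ hq))]
    · have hnd : disc ∉ altDiscs d :=
        fun h => hmem (by rw [altDiscs_append]; exact subset_discStep h)
      simp only [List.map_cons, List.map_nil]
      rw [hcol, if_pos rfl, altCol_append, hplk]
      simp [altCol_eq_nil hnd]

theorem alt_append_nil {d : List (String × List (String × Int))} {al : String} :
    criaDicInverso_alt (d ++ [(al, [])]) = criaDicInverso_alt d := by
  rw [criaDicInverso_alt, criaDicInverso_alt, altDiscs_append]
  show (altDiscs d).map _ = _
  apply List.map_congr_left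
  intro q hq
  rw [altCol_append]
  simp [List.lookup]

theorem inner_fold {d : List (String × List (String × Int))} {al : String}
    (hal : al ∉ d.map Prod.fst) :
    ∀ (rest p : List (String × Int)), ((p ++ rest).map Prod.fst).Nodup →
      rest.foldl (aInner al) (criaDicInverso_alt (d ++ [(al, p)])) =
        criaDicInverso_alt (d ++ [(al, p ++ rest)]) := by
  intro rest
  induction rest with
  | nil => intro p _; simp
  | cons q t ih =>
    intro p hnd
    have hq : q.1 ∉ p.map Prod.fst := by
      simp only [List.map_append, List.nodup_append] at hnd
      intro hm
      exact hnd.2.2 q.1 hm q.1 (List.mem_map.mpr ⟨q, List.mem_cons_self, rfl⟩) rfl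
    have := step_eq (d := d) (al := al) (p := p) (disc := q.1) (v := q.2) hal hq
    simp only [List.foldl_cons]
    rw [show (q.1, q.2) = q from rfl] at this
    rw [this]
    have hnd' : ((p ++ [q] ++ t).map Prod.fst).Nodup := by
      simpa [List.append_assoc] using hnd
    rw [ih (p ++ [q]) hnd']
    simp

theorem outer_fold :
    ∀ (rest pref : List (String × List (String × Int))),
      (((pref ++ rest).map Prod.fst).Nodup) →
      (∀ p ∈ pref ++ rest, (p.2.map Prod.fst).Nodup) →
      rest.foldl (fun dDisc p => p.2.foldl (aInner p.1) dDisc) (criaDicInverso_alt pref) =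
        criaDicInverso_alt (pref ++ rest) := by
  intro rest
  induction rest with
  | nil => intro pref _ _; simp
  | cons x t ih =>
    intro pref hnd hinner
    have hal : x.1 ∉ pref.map Prod.fst := by
      simp only [List.map_append, List.nodup_append] at hnd
      intro hm
      exact hnd.2.2 x.1 hm x.1 (List.mem_map.mpr ⟨x, List.mem_cons_self, rfl⟩) rfl
    simp only [List.foldl_cons]
    rw [show criaDicInverso_alt pref = criaDicInverso_alt (pref ++ [(x.1, [])]) from
      (alt_append_nil).symm]
    rw [inner_fold hal x.2 [] (by simpa using hinner x (by simp))]
    rw [show pref ++ [(x.1, [] ++ x.2)] = pref ++ [x] by simp]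
    have h1 : (((pref ++ [x]) ++ t).map Prod.fst).Nodup := by
      simpa [List.append_assoc] using hnd
    have h2 : ∀ p ∈ (pref ++ [x]) ++ t, (p.2.map Prod.fst).Nodup := by
      intro p hp
      exact hinner p (by simpa [List.append_assoc] using hp)
    rw [ih (pref ++ [x]) h1 h2]
    simp

-- ===== VERDICT (by name: the statement is the Claim_ definition above) =====
theorem criaDicInverso_spec : Claim_equal_criaDicInverso := by
  intro d _ hpre
  show criaDicInverso d = criaDicInverso_alt d
  have := outer_fold d [] (by simpa using hpre.1) (by simpa using hpre.2)
  simpa [criaDicInverso, criaDicInverso_alt, altDiscs, altCol] using this
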